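-- pv_equiv track=rewrite | github.com/Digital-Physics/algorithms | flipping_matrix.py | flippingMatrix
-- ===== SOURCE A (Python) =====
-- from typing import List
--
-- def flippingMatrix(matrix: List[List[int]]) -> int:
--     """
--     a b c d d c b a
--     e f g h h g f e
--     i j k l l k j i
--     m n o p p o n m
--     m n o p p o n m
--     i j k l l k j i
--     e f g h h g f e
--     a b c d d c b a
--
--     you can get the max a-p into the upper left matrix
--     through column and row transformations, like a rubik's cube.
--     """
--     total = 0
--
--     for i in range(len(matrix)//2):
--         for j in range(len(matrix)//2):
--             total += max(matrix[i][j],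
--                          matrix[-i-1][j],
--                          matrix[i][-j-1],
--                          matrix[-i-1][-j-1])
--
--     return total
-- ===== SOURCE B (Python) =====
-- def flippingMatrix(matrix):
--     n = len(matrix)
--     best = {}
--     for i, row in enumerate(matrix):
--         if i == n - 1 - i:
--             continue
--         oi = min(i, n - 1 - i)
--         for j, v in enumerate(row):
--             if j == n - 1 - j:
--                 continue
--             key = (oi, min(j, n - 1 - j))
--             if key not in best or v > best[key]:
--                 best[key] = v
--     return sum(best.values())
-- ===== Notes on version B (the rewrite author's own statement) =====
-- stated objective: alternative
-- what changed: Replaces A's nested quadrant loop that reads four mirror cells at once by a single pass over every cell of the matrix maintaining a dictionary of running maxima keyed by the cell's canonical quadrant position (skipping the fixed middle row/column), then sums the dictionary's values.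
-- outside the precondition, e.g. on flippingMatrix([[1, 2, 3], [4, 5, 6]]): A returns 6, B returns 11
import Mathlib
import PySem

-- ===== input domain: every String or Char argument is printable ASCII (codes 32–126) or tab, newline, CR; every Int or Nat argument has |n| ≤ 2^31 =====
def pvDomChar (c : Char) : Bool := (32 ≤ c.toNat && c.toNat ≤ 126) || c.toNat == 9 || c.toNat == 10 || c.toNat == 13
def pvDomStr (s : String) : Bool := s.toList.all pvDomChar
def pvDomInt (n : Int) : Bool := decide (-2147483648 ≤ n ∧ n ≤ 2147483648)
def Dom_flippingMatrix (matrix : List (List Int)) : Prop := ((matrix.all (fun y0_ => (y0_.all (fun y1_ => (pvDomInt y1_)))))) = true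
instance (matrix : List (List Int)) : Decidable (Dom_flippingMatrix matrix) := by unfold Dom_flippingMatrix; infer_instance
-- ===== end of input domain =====

-- B replaces A's nested quadrant loop (four mirror reads per step) by a single pass over all
-- cells maintaining a dictionary of running maxima keyed by canonical quadrant position,
-- then sums the dictionary's values: a different algorithm of the same O(n^2) cost.

-- ===== PORT A =====
def flippingMatrix (matrix : List (List Int)) : Int :=
  let half : Nat := matrix.length / 2
  (PySem.List.pyRange 0 (half : Int) 1).foldl (fun total i =>
    (PySem.List.pyRange 0 (half : Int) 1).foldl (fun total j =>
      total + max (max (max (PySem.List.pyGetD (PySem.List.pyGetD matrix i []) j 0)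
                            (PySem.List.pyGetD (PySem.List.pyGetD matrix (-i-1) []) j 0))
                       (PySem.List.pyGetD (PySem.List.pyGetD matrix i []) (-j-1) 0))
                  (PySem.List.pyGetD (PySem.List.pyGetD matrix (-i-1) []) (-j-1) 0)) total) 0

-- ===== PORT B =====
def flippingMatrix_alt (matrix : List (List Int)) : Int :=
  let n : Int := matrix.length
  let best : PySem.Dict (Int × Int) Int :=
    (PySem.List.enumerate matrix).foldl (fun best p =>
      if p.1 == n - 1 - p.1 then best else
      let oi := min p.1 (n - 1 - p.1)
      (PySem.List.enumerate p.2).foldl (fun b q =>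
        if q.1 == n - 1 - q.1 then b else
        let key := (oi, min q.1 (n - 1 - q.1))
        match b.get? key with
        | none => b.insert key q.2
        | some w => if q.2 > w then b.insert key q.2 else b) best) PySem.Dict.empty
  best.values.sum

-- ===== PRECONDITION & SPEC =====
-- Pre_ restricts to square matrices (plus the trivial height ≤ 1, where nothing is scanned):
-- on ragged matrices A still returns a value assembled by negative indexing relative to each
-- row's own length — a corner no caller would specify — which B's whole-matrix grouping by
-- quadrant position does not reproduce.
def Pre_flippingMatrix (matrix : List (List Int)) : Prop :=
  matrix.length ≤ 1 ∨ ∀ row ∈ matrix, row.length = matrix.length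
instance (matrix : List (List Int)) : Decidable (Pre_flippingMatrix matrix) := by
  unfold Pre_flippingMatrix; infer_instance
def pvWitness_flippingMatrix : List (List Int) := [[1, 2], [3, 4]]

def Spec_flippingMatrix (matrix : List (List Int)) (out : Int) : Prop := out = flippingMatrix_alt matrix
instance (matrix : List (List Int)) (out : Int) : Decidable (Spec_flippingMatrix matrix out) := by unfold Spec_flippingMatrix; infer_instance

-- ===== CLAIM (what is proved, stated in full; the proofs are below) =====
def Claim_equal_flippingMatrix : Prop := ∀ (matrix : List (List Int)), Dom_flippingMatrix matrix → Pre_flippingMatrix matrix → Spec_flippingMatrix matrix (flippingMatrix matrix)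

-- ===== LEMMAS AND PROOFS =====

-- the update step of B's dictionary loop, factored out
def pvUpd (b : PySem.Dict (Int × Int) Int) (p : (Int × Int) × Int) : PySem.Dict (Int × Int) Int :=
  match b.get? p.1 with
  | none => b.insert p.1 p.2
  | some w => if p.2 > w then b.insert p.1 p.2 else b

-- the stream of (key, value) pairs B feeds to the dictionary, flattened
def pvPairs (n : Int) (matrix : List (List Int)) : List ((Int × Int) × Int) :=
  (PySem.List.enumerate matrix).flatMap (fun p =>
    if p.1 == n - 1 - p.1 then [] else
    (PySem.List.enumerate p.2).filterMap (fun q =>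
      if q.1 == n - 1 - q.1 then none else
      some ((min p.1 (n - 1 - p.1), min q.1 (n - 1 - q.1)), q.2)))

-- option-valued running max
def pvOMax (vs : List Int) (o : Option Int) : Option Int :=
  vs.foldl (fun o v => some (o.elim v (max · v))) o

-- the values in pvPairs carrying key k, in stream order
def pvVals (n : Int) (matrix : List (List Int)) (k : Int × Int) : List Int :=
  (pvPairs n matrix).filterMap (fun p => if p.1 = k then some p.2 else none)

-- the cell at row i, column j
def pvM (matrix : List (List Int)) (i j : Nat) : Int := (matrix.getD i []).getD j 0

-- canonical quadrant key of cell (i, j) in an n × n matrix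
def pvKey (n i j : Nat) : Int × Int := (((min i (n - 1 - i) : Nat) : Int), ((min j (n - 1 - j) : Nat) : Int))

-- the pair stream, re-indexed over List.range (valid for square matrices)
def pvRangePairs (n : Nat) (matrix : List (List Int)) : List ((Int × Int) × Int) :=
  (List.range n).flatMap (fun i =>
    if i = n - 1 - i then [] else
    (List.range n).filterMap (fun j =>
      if j = n - 1 - j then none else some (pvKey n i j, pvM matrix i j)))

-- the quadrant key list
def pvQ (h : Nat) : List (Int × Int) :=
  (List.range h).flatMap (fun a => (List.range h).map (fun b => (((a : Nat) : Int), ((b : Nat) : Int))))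

theorem pv_foldl_flatMap {α β σ : Type} (l : List α) (f : α → List β) (g : σ → β → σ) (s : σ) :
    (l.flatMap f).foldl g s = l.foldl (fun s a => (f a).foldl g s) s := by
  induction l generalizing s with
  | nil => rfl
  | cons x xs ih => simp [List.flatMap_cons, List.foldl_append, ih]

theorem pv_foldl_filterMap {α β σ : Type} (l : List α) (f : α → Option β) (g : σ → β → σ) (s : σ) :
    (l.filterMap f).foldl g s = l.foldl (fun s a => match f a with | none => s | some b => g s b) s := by
  induction l generalizing s with
  | nil => rfl
  | cons x xs ih => cases h : f x <;> simp [h, ih]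

-- B's nested loop is the pvUpd-fold over the flattened pair stream
theorem pv_alt_eq (matrix : List (List Int)) :
    flippingMatrix_alt matrix =
      ((pvPairs (matrix.length : Int) matrix).foldl pvUpd PySem.Dict.empty).values.sum := by
  simp only [flippingMatrix_alt, pvPairs]
  rw [pv_foldl_flatMap]
  congr 2
  apply PySem.List.foldl_congr_mem
  intro b p _
  by_cases h : p.1 == (matrix.length : Int) - 1 - p.1
  · simp [h]
  · simp only [h, if_false, Bool.false_eq_true]
    rw [pv_foldl_filterMap]
    apply PySem.List.foldl_congr_mem
    intro b' q _
    by_cases h2 : q.1 == (matrix.length : Int) - 1 - q.1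
    · simp [h2]
    · simp only [h2, if_false, Bool.false_eq_true]
      rfl

theorem pv_get?_upd_of_ne (d : PySem.Dict (Int × Int) Int) (p : (Int × Int) × Int) (k : Int × Int)
    (hk : p.1 ≠ k) : (pvUpd d p).get? k = d.get? k := by
  unfold pvUpd
  cases hd : d.get? p.1 with
  | none => simp [PySem.Dict.get?_insert, hk.symm]
  | some w =>
    by_cases hgt : p.2 > w
    · simp [hgt, PySem.Dict.get?_insert, hk.symm]
    · simp [hgt]

-- lookup after the fold is the running max of the values at that key
theorem pv_get?_foldl_upd (P : List ((Int × Int) × Int)) (d : PySem.Dict (Int × Int) Int) (k : Int × Int) :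
    ((P.foldl pvUpd d).get? k) =
      pvOMax (P.filterMap (fun p => if p.1 = k then some p.2 else none)) (d.get? k) := by
  induction P generalizing d with
  | nil => rfl
  | cons p P ih =>
    rw [List.foldl_cons, ih]
    by_cases hk : p.1 = k
    · subst hk
      cases hd : d.get? p.1 with
      | none => simp [pvUpd, hd, pvOMax, PySem.Dict.get?_insert_self]
      | some w =>
        by_cases hgt : p.2 > w
        · simp [pvUpd, hd, hgt, pvOMax, PySem.Dict.get?_insert_self, max_eq_right (le_of_lt hgt)]
        · simp [pvUpd, hd, hgt, pvOMax, max_eq_left (not_lt.mp hgt)]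
    · simp [pv_get?_upd_of_ne d p k hk, hk]

theorem pv_nodup_foldl_upd (P : List ((Int × Int) × Int)) (d : PySem.Dict (Int × Int) Int)
    (h : d.keys.Nodup) : (P.foldl pvUpd d).keys.Nodup := by
  induction P generalizing d with
  | nil => exact h
  | cons p P ih =>
    apply ih
    unfold pvUpd
    cases d.get? p.1 with
    | none => exact PySem.Dict.nodup_keys_insert _ _ _ h
    | some w =>
      by_cases hgt : p.2 > w
      · simp only [hgt, if_true]; exact PySem.Dict.nodup_keys_insert _ _ _ h
      · simpa [hgt]

-- filterMap over a range hitting exactly two indices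
theorem pv_range_filterMap_pair {α : Type} (n b c : Nat) (hbc : b < c) (hc : c < n)
    (F : Nat → Option α) (x y : α) (hb : F b = some x) (hcv : F c = some y)
    (hother : ∀ j, j < n → j ≠ b → j ≠ c → F j = none) :
    (List.range n).filterMap F = [x, y] := by
  have aux : ∀ m, m ≤ n →
      (List.range m).filterMap F = (if b < m then [x] else []) ++ (if c < m then [y] else []) := by
    intro m
    induction m with
    | zero => simp
    | succ m ih =>
      intro hm
      rw [List.range_succ, List.filterMap_append, ih (by omega)]
      by_cases h1 : m = b
      · rw [if_neg (show ¬ b < m by omega), if_neg (show ¬ c < m by omega),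
            if_pos (show b < m + 1 by omega), if_neg (show ¬ c < m + 1 by omega)]
        simp [h1, hb]
      · by_cases h2 : m = c
        · rw [if_pos (show b < m by omega), if_neg (show ¬ c < m by omega),
              if_pos (show b < m + 1 by omega), if_pos (show c < m + 1 by omega)]
          simp [h2, hcv]
        · rw [show (List.filterMap F [m]) = [] by simp [hother m (by omega) h1 h2]]
          have e1 : b < m + 1 ↔ b < m := by omega
          have e2 : c < m + 1 ↔ c < m := by omega
          simp only [e1, e2, List.append_nil]
  have := aux n le_rfl
  simpa [show b < n by omega, hc] using this

-- flatMap over a range with all rows empty except two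
theorem pv_range_flatMap_pair {α : Type} (n b c : Nat) (hbc : b < c) (hc : c < n)
    (G : Nat → List α) (hother : ∀ j, j < n → j ≠ b → j ≠ c → G j = []) :
    (List.range n).flatMap G = G b ++ G c := by
  have aux : ∀ m, m ≤ n →
      (List.range m).flatMap G = (if b < m then G b else []) ++ (if c < m then G c else []) := by
    intro m
    induction m with
    | zero => simp
    | succ m ih =>
      intro hm
      rw [List.range_succ, List.flatMap_append, ih (by omega)]
      by_cases h1 : m = b
      · rw [if_neg (show ¬ b < m by omega), if_neg (show ¬ c < m by omega),
            if_pos (show b < m + 1 by omega), if_neg (show ¬ c < m + 1 by omega)]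
        simp [h1]
      · by_cases h2 : m = c
        · rw [if_pos (show b < m by omega), if_neg (show ¬ c < m by omega),
              if_pos (show b < m + 1 by omega), if_pos (show c < m + 1 by omega)]
          simp [h2]
        · rw [show (List.flatMap G [m]) = [] by simp [hother m (by omega) h1 h2]]
          have e1 : b < m + 1 ↔ b < m := by omega
          have e2 : c < m + 1 ↔ c < m := by omega
          simp only [e1, e2, List.append_nil]
  have := aux n le_rfl
  simpa [show b < n by omega, hc] using this

theorem pv_flatMap_congr {α β : Type} (l : List α) (f g : α → List β)
    (h : ∀ a ∈ l, f a = g a) : l.flatMap f = l.flatMap g := by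
  induction l with
  | nil => rfl
  | cons x xs ih =>
    simp only [List.flatMap_cons]
    rw [h x (List.mem_cons_self), ih (fun a ha => h a (List.mem_cons_of_mem _ ha))]

theorem pv_filterMap_congr {α β : Type} (l : List α) (f g : α → Option β)
    (h : ∀ a ∈ l, f a = g a) : l.filterMap f = l.filterMap g := by
  induction l with
  | nil => rfl
  | cons x xs ih =>
    simp only [List.filterMap_cons]
    rw [h x (List.mem_cons_self), ih (fun a ha => h a (List.mem_cons_of_mem _ ha))]

-- on a square matrix the pair stream is the range-indexed stream
theorem pv_row_len (matrix : List (List Int)) (hsq : ∀ row ∈ matrix, row.length = matrix.length)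
    {i : Nat} (hi : i < matrix.length) : (matrix.getD i []).length = matrix.length := by
  apply hsq
  rw [List.getD_eq_getElem _ _ hi]
  exact List.getElem_mem _

theorem pv_key_cast (n i : Nat) (hin : i < n) :
    ((min i (n - 1 - i) : Nat) : Int) = min (i : Int) ((n : Int) - 1 - i) := by
  have h : ((n - 1 - i : Nat) : Int) = (n : Int) - 1 - (i : Int) := by omega
  rw [Nat.cast_min, h]

theorem pv_pairs_eq_rangePairs (matrix : List (List Int))
    (hsq : ∀ row ∈ matrix, row.length = matrix.length) :
    pvPairs (matrix.length : Int) matrix = pvRangePairs matrix.length matrix := by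
  unfold pvPairs pvRangePairs
  rw [PySem.List.enumerate_eq_map_pyRange matrix ([] : List Int)]
  rw [show PySem.List.len matrix = ((matrix.length : Nat) : Int) from rfl]
  rw [PySem.List.pyRange_zero_nat, List.map_map, List.flatMap_map]
  apply pv_flatMap_congr
  intro i hi
  rw [List.mem_range] at hi
  simp only [Function.comp_apply]
  rw [PySem.List.pyGetD_natCast matrix i []]
  by_cases hc : i = matrix.length - 1 - i
  · rw [if_pos (by simp only [beq_iff_eq]; omega), if_pos hc]
  · rw [if_neg (by simp only [beq_iff_eq]; omega), if_neg hc]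
    rw [PySem.List.enumerate_eq_map_pyRange (matrix.getD i []) (0 : Int)]
    rw [show PySem.List.len (matrix.getD i []) = (((matrix.getD i []).length : Nat) : Int) from rfl]
    rw [pv_row_len matrix hsq hi]
    rw [PySem.List.pyRange_zero_nat, List.map_map, List.filterMap_map]
    apply pv_filterMap_congr
    intro j hj
    rw [List.mem_range] at hj
    simp only [Function.comp_apply]
    by_cases hcj : j = matrix.length - 1 - j
    · rw [if_pos (by simp only [beq_iff_eq]; omega), if_pos hcj]
    · rw [if_neg (by simp only [beq_iff_eq]; omega), if_neg hcj]
      rw [PySem.List.pyGetD_natCast]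
      unfold pvKey pvM
      rw [pv_key_cast _ _ hi, pv_key_cast _ _ hj]

theorem pv_foldl2_sum {α β : Type} (l1 : List α) (l2 : List β) (F : α → β → Int) (a : Int) :
    l1.foldl (fun t i => l2.foldl (fun u j => u + F i j) t) a
      = a + (l1.map (fun i => (l2.map (F i)).sum)).sum := by
  induction l1 generalizing a with
  | nil => simp
  | cons x xs ih =>
      simp only [List.foldl_cons, PySem.List.foldl_add, List.map_cons, List.sum_cons]
      ring

theorem pv_getD_neg (xs : List Int) (j : Nat) (hj : j < xs.length) :
    PySem.List.pyGetD xs (-(j : Int) - 1) 0 = xs.getD (xs.length - 1 - j) 0 := by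
  have h1 : (-(j : Int) - 1) = -(((j + 1 : Nat)) : Int) := by push_cast; ring
  rw [h1, PySem.List.pyGetD_neg_natCast xs (j + 1) 0 (by omega) (by omega),
      ← List.getD_eq_getElem xs 0 (show xs.length - (j + 1) < xs.length by omega)]
  congr 1
  omega

theorem pv_getD_neg' (xs : List (List Int)) (j : Nat) (hj : j < xs.length) :
    PySem.List.pyGetD xs (-(j : Int) - 1) [] = xs.getD (xs.length - 1 - j) [] := by
  have h1 : (-(j : Int) - 1) = -(((j + 1 : Nat)) : Int) := by push_cast; ring
  rw [h1, PySem.List.pyGetD_neg_natCast xs (j + 1) [] (by omega) (by omega),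
      ← List.getD_eq_getElem xs [] (show xs.length - (j + 1) < xs.length by omega)]
  congr 1
  omega

-- A as a double sum over ranges (square case)
theorem pv_A_eq_sum (matrix : List (List Int))
    (hsq : ∀ row ∈ matrix, row.length = matrix.length) :
    flippingMatrix matrix =
      ((List.range (matrix.length / 2)).map (fun i =>
        ((List.range (matrix.length / 2)).map (fun j =>
          max (max (max (pvM matrix i j)
                        (pvM matrix (matrix.length - 1 - i) j))
                   (pvM matrix i (matrix.length - 1 - j)))
              (pvM matrix (matrix.length - 1 - i) (matrix.length - 1 - j)))).sum)).sum := by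
  simp only [flippingMatrix]
  rw [pv_foldl2_sum, PySem.List.pyRange_zero_nat, List.map_map, zero_add]
  congr 1
  apply List.map_congr_left
  intro i hi
  rw [List.mem_range] at hi
  simp only [Function.comp_apply]
  rw [List.map_map]
  congr 1
  apply List.map_congr_left
  intro j hj
  rw [List.mem_range] at hj
  simp only [Function.comp_apply]
  have hin : i < matrix.length := by omega
  have hjn : j < matrix.length := by omega
  have hrow1 : (matrix.getD i []).length = matrix.length := pv_row_len matrix hsq hin
  have hrow2 : (matrix.getD (matrix.length - 1 - i) []).length = matrix.length :=
    pv_row_len matrix hsq (by omega)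
  rw [PySem.List.pyGetD_natCast matrix i [], pv_getD_neg' matrix i hin]
  rw [PySem.List.pyGetD_natCast, PySem.List.pyGetD_natCast]
  rw [pv_getD_neg _ j (by omega), pv_getD_neg _ j (by omega), hrow1, hrow2]
  rfl

-- the values carrying a quadrant key, read off the range-indexed stream
theorem pv_valsR (matrix : List (List Int)) (hn2 : 2 ≤ matrix.length)
    (a b : Nat) (ha : a < matrix.length / 2) (hb : b < matrix.length / 2) :
    (pvRangePairs matrix.length matrix).filterMap
        (fun p => if p.1 = (((a : Nat) : Int), ((b : Nat) : Int)) then some p.2 else none)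
      = [pvM matrix a b, pvM matrix a (matrix.length - 1 - b),
         pvM matrix (matrix.length - 1 - a) b,
         pvM matrix (matrix.length - 1 - a) (matrix.length - 1 - b)] := by
  unfold pvRangePairs
  rw [List.filterMap_flatMap]
  rw [pv_range_flatMap_pair matrix.length a (matrix.length - 1 - a) (by omega) (by omega) _ ?hother]
  case hother =>
    intro i hi h1 h2
    by_cases hc : i = matrix.length - 1 - i
    · rw [if_pos hc]; rfl
    · rw [if_neg hc, List.filterMap_filterMap, List.filterMap_eq_nil_iff]
      intro j hj
      by_cases hcj : j = matrix.length - 1 - j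
      · rw [if_pos hcj]; rfl
      · rw [if_neg hcj]
        simp only [Option.bind_some]
        apply if_neg
        intro hk
        unfold pvKey at hk
        rw [Prod.mk.injEq] at hk
        have := hk.1
        rw [Nat.cast_inj] at this
        omega
  · rw [if_neg (show ¬ a = matrix.length - 1 - a by omega),
        if_neg (show ¬ matrix.length - 1 - a = matrix.length - 1 - (matrix.length - 1 - a) by omega)]
    rw [List.filterMap_filterMap, List.filterMap_filterMap]
    rw [pv_range_filterMap_pair matrix.length b (matrix.length - 1 - b) (by omega) (by omega) _
          (pvM matrix a b) (pvM matrix a (matrix.length - 1 - b)) ?f1 ?f2 ?fo]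
    rw [pv_range_filterMap_pair matrix.length b (matrix.length - 1 - b) (by omega) (by omega) _
          (pvM matrix (matrix.length - 1 - a) b)
          (pvM matrix (matrix.length - 1 - a) (matrix.length - 1 - b)) ?g1 ?g2 ?go]
    · rfl
    case f1 =>
      rw [if_neg (show ¬ b = matrix.length - 1 - b by omega)]
      simp only [Option.bind_some]
      rw [if_pos]
      unfold pvKey
      rw [show min a (matrix.length - 1 - a) = a from by omega,
          show min b (matrix.length - 1 - b) = b from by omega]
    case f2 =>
      rw [if_neg (show ¬ matrix.length - 1 - b = matrix.length - 1 - (matrix.length - 1 - b) by omega)]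
      simp only [Option.bind_some]
      rw [if_pos]
      unfold pvKey
      rw [show min a (matrix.length - 1 - a) = a from by omega,
          show min (matrix.length - 1 - b) (matrix.length - 1 - (matrix.length - 1 - b)) = b from by omega]
    case fo =>
      intro j hj h1 h2
      by_cases hcj : j = matrix.length - 1 - j
      · rw [if_pos hcj]; rfl
      · rw [if_neg hcj]
        simp only [Option.bind_some]
        apply if_neg
        intro hk
        unfold pvKey at hk
        rw [Prod.mk.injEq] at hk
        have := hk.2
        rw [Nat.cast_inj] at this
        omega
    case g1 =>
      rw [if_neg (show ¬ b = matrix.length - 1 - b by omega)]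
      simp only [Option.bind_some]
      rw [if_pos]
      unfold pvKey
      rw [show min (matrix.length - 1 - a) (matrix.length - 1 - (matrix.length - 1 - a)) = a from by omega,
          show min b (matrix.length - 1 - b) = b from by omega]
    case g2 =>
      rw [if_neg (show ¬ matrix.length - 1 - b = matrix.length - 1 - (matrix.length - 1 - b) by omega)]
      simp only [Option.bind_some]
      rw [if_pos]
      unfold pvKey
      rw [show min (matrix.length - 1 - a) (matrix.length - 1 - (matrix.length - 1 - a)) = a from by omega,
          show min (matrix.length - 1 - b) (matrix.length - 1 - (matrix.length - 1 - b)) = b from by omega]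
    case go =>
      intro j hj h1 h2
      by_cases hcj : j = matrix.length - 1 - j
      · rw [if_pos hcj]; rfl
      · rw [if_neg hcj]
        simp only [Option.bind_some]
        apply if_neg
        intro hk
        unfold pvKey at hk
        rw [Prod.mk.injEq] at hk
        have := hk.2
        rw [Nat.cast_inj] at this
        omega

theorem pv_nodup_flatMap {α β : Type} (l : List α) (f : α → List β) (hl : l.Nodup)
    (hf : ∀ a ∈ l, (f a).Nodup)
    (hdisj : ∀ a ∈ l, ∀ b ∈ l, a ≠ b → ∀ x ∈ f a, x ∉ f b) : (l.flatMap f).Nodup := by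
  induction l with
  | nil => simp
  | cons x xs ih =>
    rw [List.flatMap_cons, List.nodup_append]
    refine ⟨hf x List.mem_cons_self, ?_, ?_⟩
    · exact ih (List.nodup_cons.mp hl).2 (fun a ha => hf a (List.mem_cons_of_mem _ ha))
        (fun a ha b hb hab => hdisj a (List.mem_cons_of_mem _ ha) b (List.mem_cons_of_mem _ hb) hab)
    · intro y hy z hz heq
      subst heq
      rw [List.mem_flatMap] at hz
      obtain ⟨b, hb, hyb⟩ := hz
      have hxb : x ≠ b := by
        intro h
        subst h
        exact (List.nodup_cons.mp hl).1 hb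
      exact hdisj x List.mem_cons_self b (List.mem_cons_of_mem _ hb) hxb y hy hyb

theorem pv_nodup_Q (h : Nat) : (pvQ h).Nodup := by
  apply pv_nodup_flatMap _ _ (List.nodup_range)
  · intro a _
    apply List.Nodup.map _ List.nodup_range
    intro b1 b2 hb
    rw [Prod.mk.injEq] at hb
    exact_mod_cast hb.2
  · intro a _ b _ hab x hx hx2
    rw [List.mem_map] at hx hx2
    obtain ⟨c1, _, hc1⟩ := hx
    obtain ⟨c2, _, hc2⟩ := hx2
    rw [← hc2] at hc1
    rw [Prod.mk.injEq] at hc1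
    exact hab (by exact_mod_cast hc1.1)

theorem pv_mem_keys_iff (matrix : List (List Int)) (hn2 : 2 ≤ matrix.length)
    (k : Int × Int) :
    k ∈ ((pvRangePairs matrix.length matrix).foldl pvUpd PySem.Dict.empty).keys ↔
      k ∈ pvQ (matrix.length / 2) := by
  have hg : ((pvRangePairs matrix.length matrix).foldl pvUpd PySem.Dict.empty).get? k =
      pvOMax ((pvRangePairs matrix.length matrix).filterMap
        (fun p => if p.1 = k then some p.2 else none)) none := by
    rw [pv_get?_foldl_upd]
    rfl
  constructor
  · intro hk
    have hne : ((pvRangePairs matrix.length matrix).foldl pvUpd PySem.Dict.empty).get? k ≠ none := by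
      rw [ne_eq, PySem.Dict.get?_eq_none_iff_not_mem_keys]
      simp [hk]
    rw [hg] at hne
    have hvs : ((pvRangePairs matrix.length matrix).filterMap
        (fun p => if p.1 = k then some p.2 else none)) ≠ [] := by
      intro h0
      rw [h0] at hne
      exact hne rfl
    obtain ⟨v, hv⟩ := List.exists_mem_of_ne_nil _ hvs
    rw [List.mem_filterMap] at hv
    obtain ⟨p, hp, hsel⟩ := hv
    have hpk : p.1 = k := by
      by_cases hh : p.1 = k
      · exact hh
      · rw [if_neg hh] at hsel; cases hsel
    unfold pvRangePairs at hp
    rw [List.mem_flatMap] at hp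
    obtain ⟨i, hi, hpi⟩ := hp
    rw [List.mem_range] at hi
    by_cases hc : i = matrix.length - 1 - i
    · rw [if_pos hc] at hpi; cases hpi
    · rw [if_neg hc, List.mem_filterMap] at hpi
      obtain ⟨j, hj, hpj⟩ := hpi
      rw [List.mem_range] at hj
      by_cases hcj : j = matrix.length - 1 - j
      · rw [if_pos hcj] at hpj; cases hpj
      · rw [if_neg hcj] at hpj
        have hp1 : p.1 = pvKey matrix.length i j := by
          rw [← Option.some_inj] at hpj
          cases hpj
          rfl
        rw [← hpk, hp1]
        unfold pvQ pvKey
        rw [List.mem_flatMap]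
        refine ⟨min i (matrix.length - 1 - i), ?_, ?_⟩
        · rw [List.mem_range]; omega
        · rw [List.mem_map]
          exact ⟨min j (matrix.length - 1 - j), by rw [List.mem_range]; omega, rfl⟩
  · intro hk
    unfold pvQ at hk
    rw [List.mem_flatMap] at hk
    obtain ⟨a, ha, hk2⟩ := hk
    rw [List.mem_range] at ha
    rw [List.mem_map] at hk2
    obtain ⟨b, hb, hk3⟩ := hk2
    rw [List.mem_range] at hb
    subst hk3
    have hne : ((pvRangePairs matrix.length matrix).foldl pvUpd PySem.Dict.empty).get?
        (((a : Nat) : Int), ((b : Nat) : Int)) ≠ none := by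
      rw [hg, pv_valsR matrix hn2 a b ha hb]
      simp [pvOMax]
    by_contra hnk
    exact hne ((PySem.Dict.get?_eq_none_iff_not_mem_keys _ _).mpr hnk)

theorem pv_sum_flatMap {α : Type} (l : List α) (f : α → List Int) :
    (l.flatMap f).sum = (l.map (fun x => (f x).sum)).sum := by
  rw [List.flatMap_def, List.sum_flatten, List.map_map]
  rfl

-- B as the same double sum (square case, n ≥ 2)
theorem pv_B_eq_sum (matrix : List (List Int)) (hn2 : 2 ≤ matrix.length)
    (hsq : ∀ row ∈ matrix, row.length = matrix.length) :
    flippingMatrix_alt matrix =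
      ((List.range (matrix.length / 2)).map (fun i =>
        ((List.range (matrix.length / 2)).map (fun j =>
          max (max (max (pvM matrix i j)
                        (pvM matrix (matrix.length - 1 - i) j))
                   (pvM matrix i (matrix.length - 1 - j)))
              (pvM matrix (matrix.length - 1 - i) (matrix.length - 1 - j)))).sum)).sum := by
  rw [pv_alt_eq, pv_pairs_eq_rangePairs matrix hsq]
  have hnd : ((pvRangePairs matrix.length matrix).foldl pvUpd PySem.Dict.empty).keys.Nodup :=
    pv_nodup_foldl_upd _ _ PySem.Dict.nodup_keys_empty
  rw [PySem.Dict.values_eq_map_keys _ hnd 0]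
  have hperm : ((pvRangePairs matrix.length matrix).foldl pvUpd PySem.Dict.empty).keys.Perm
      (pvQ (matrix.length / 2)) :=
    (List.perm_ext_iff_of_nodup hnd (pv_nodup_Q _)).mpr (pv_mem_keys_iff matrix hn2)
  rw [(hperm.map _).sum_eq]
  unfold pvQ
  rw [List.map_flatMap, pv_sum_flatMap]
  congr 1
  apply List.map_congr_left
  intro a ha
  rw [List.mem_range] at ha
  simp only [List.map_map]
  congr 1
  apply List.map_congr_left
  intro b hb
  rw [List.mem_range] at hb
  simp only [Function.comp_apply]
  rw [PySem.Dict.getD_eq_get?_getD, pv_get?_foldl_upd,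
      show (PySem.Dict.empty : PySem.Dict (Int × Int) Int).get? (((a : Nat) : Int), ((b : Nat) : Int)) = none from rfl,
      pv_valsR matrix hn2 a b ha hb]
  show max (max (max (pvM matrix a b) (pvM matrix a (matrix.length - 1 - b)))
          (pvM matrix (matrix.length - 1 - a) b))
        (pvM matrix (matrix.length - 1 - a) (matrix.length - 1 - b)) = _
  rw [max_right_comm (pvM matrix a b) (pvM matrix a (matrix.length - 1 - b))
      (pvM matrix (matrix.length - 1 - a) b)]

theorem pv_small (matrix : List (List Int)) (h : matrix.length ≤ 1) :
    flippingMatrix matrix = flippingMatrix_alt matrix := by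
  match matrix with
  | [] => rfl
  | [row] =>
    simp [flippingMatrix, flippingMatrix_alt, PySem.List.enumerate]
    rfl

-- ===== VERDICT (by name: the statement is the Claim_ definition above) =====
theorem flippingMatrix_spec : Claim_equal_flippingMatrix := by
  intro matrix _ hpre
  unfold Spec_flippingMatrix
  by_cases hle : matrix.length ≤ 1
  · exact pv_small matrix hle
  · have hsq : ∀ row ∈ matrix, row.length = matrix.length := by
      rcases hpre with h | h
      · omega
      · exact h
    rw [pv_A_eq_sum matrix hsq, pv_B_eq_sum matrix (by omega) hsq]
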